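-- pv_equiv track=rewrite | github.com/KiritoFD/Latent_Style | Related_Works/import_summary_history_to_csv.py | _get_all_fieldnames
-- ===== SOURCE A (Python) =====
-- from typing import Any, Dict, List, Optional, Set, Tuple
--
-- def _get_all_fieldnames(records: List[Dict[str, str]]) -> List[str]:
--     """Get all unique field names in order."""
--     seen = set()
--     result = []
--
--     # Priority order for common columns
--     priority = [
--         'experiment_id', 'epoch', 'source_file', 'updated_at',
--         'clip_style', 'clip_content', 'content_lpips',
--         'all_clip_style', 'all_clip_content', 'all_content_lpips',
--         'all_fid', 'all_art_fid', 'all_classifier_acc',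
--         'transfer_clip_style', 'transfer_clip_content', 'transfer_content_lpips',
--         'transfer_fid', 'transfer_art_fid', 'transfer_classifier_acc',
--         'photo_to_art_clip_style', 'photo_to_art_clip_content',
--         'photo_to_art_fid', 'photo_to_art_art_fid',
--         'photo_to_art_classifier_acc',
--     ]
--
--     # Add priority columns first
--     for col in priority:
--         if any(col in r for r in records):
--             result.append(col)
--             seen.add(col)
--
--     # Add remaining columns
--     for record in records:
--         for key in record.keys():
--             if key not in seen:
--                 result.append(key)
--                 seen.add(key)
--
--     return result
-- ===== SOURCE B (Python) =====
-- def _get_all_fieldnames(records):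
--     """Get all unique field names in order."""
--     priority = [
--         'experiment_id', 'epoch', 'source_file', 'updated_at',
--         'clip_style', 'clip_content', 'content_lpips',
--         'all_clip_style', 'all_clip_content', 'all_content_lpips',
--         'all_fid', 'all_art_fid', 'all_classifier_acc',
--         'transfer_clip_style', 'transfer_clip_content', 'transfer_content_lpips',
--         'transfer_fid', 'transfer_art_fid', 'transfer_classifier_acc',
--         'photo_to_art_clip_style', 'photo_to_art_clip_content',
--         'photo_to_art_fid', 'photo_to_art_art_fid',
--         'photo_to_art_classifier_acc',
--     ]
--     # rank-based sort: priority columns get their priority index; any other key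
--     # gets len(priority) + its first-appearance number, so one sort produces the order
--     rank = {c: i for i, c in enumerate(priority)}
--     order = {}
--     for r in records:
--         for k in r:
--             if k not in order:
--                 order[k] = len(priority) + len(order)
--     return sorted(order, key=lambda k: rank.get(k, order[k]))
-- ===== Notes on version B (the rewrite author's own statement) =====
-- stated objective: alternative
-- what changed: B replaces A's two-phase scan-and-append (per-priority rescans of all records, then a seen-set pass) by a rank-based sort: every key gets a numeric rank (priority index, or len(priority)+first-appearance number) and one sorted() call with that key produces the whole order.
import Mathlib
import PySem

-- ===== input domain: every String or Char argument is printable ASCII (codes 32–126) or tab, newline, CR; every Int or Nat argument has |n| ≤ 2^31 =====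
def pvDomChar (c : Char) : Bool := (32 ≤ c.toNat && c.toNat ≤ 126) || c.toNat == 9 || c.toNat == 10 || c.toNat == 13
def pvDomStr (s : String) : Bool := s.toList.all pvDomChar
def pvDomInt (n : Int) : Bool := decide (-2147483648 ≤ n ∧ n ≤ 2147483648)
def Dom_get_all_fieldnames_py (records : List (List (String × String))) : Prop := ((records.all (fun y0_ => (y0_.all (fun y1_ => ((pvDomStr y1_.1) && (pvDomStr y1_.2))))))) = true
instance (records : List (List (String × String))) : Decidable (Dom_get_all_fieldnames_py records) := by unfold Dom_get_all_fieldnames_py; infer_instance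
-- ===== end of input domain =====

-- B replaces A's two-phase scan-and-append (per-priority rescans of the records, then a
-- seen-set pass) by a rank-based sort: each key gets a numeric rank and one sorted() call
-- with that rank as the key produces the whole order (objective: alternative algorithm).

-- the priority-column constant shared by both Pythons
def pvPriorityList : List String :=
  ["experiment_id", "epoch", "source_file", "updated_at",
   "clip_style", "clip_content", "content_lpips",
   "all_clip_style", "all_clip_content", "all_content_lpips",
   "all_fid", "all_art_fid", "all_classifier_acc",
   "transfer_clip_style", "transfer_clip_content", "transfer_content_lpips",
   "transfer_fid", "transfer_art_fid", "transfer_classifier_acc",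
   "photo_to_art_clip_style", "photo_to_art_clip_content",
   "photo_to_art_fid", "photo_to_art_art_fid",
   "photo_to_art_classifier_acc"]

-- ===== PORT A =====
def get_all_fieldnames_py (records : List (List (String × String))) : List String :=
  -- seen = set(); result = []; for col in priority: if any(col in r for r in records): append+add
  let st1 : PySem.Set String × List String :=
    pvPriorityList.foldl
      (fun st col =>
        if records.any (fun r => r.any (fun kv => kv.1 == col)) then
          (PySem.Set.add st.1 col, st.2 ++ [col])
        else st)
      (PySem.Set.empty, [])
  -- for record in records: for key in record.keys(): if key not in seen: append+add
  let st2 : PySem.Set String × List String :=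
    records.foldl
      (fun st r =>
        r.foldl
          (fun st kv =>
            if PySem.Set.contains st.1 kv.1 then st
            else (PySem.Set.add st.1 kv.1, st.2 ++ [kv.1]))
          st)
      st1
  st2.2

-- ===== PORT B =====
def get_all_fieldnames_py_alt (records : List (List (String × String))) : List String :=
  -- rank = {c: i for i, c in enumerate(priority)}
  let rank : PySem.Dict String Int :=
    (PySem.List.enumerate pvPriorityList).foldl (fun d p => d.insert p.2 p.1) PySem.Dict.empty
  -- order = {}; for r in records: for k in r: if k not in order: order[k] = len(priority) + len(order)
  let order : PySem.Dict String Int :=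
    records.foldl
      (fun order r =>
        r.foldl
          (fun order kv =>
            if order.contains kv.1 then order
            else order.insert kv.1 ((pvPriorityList.length : Int) + (order.size : Int)))
          order)
      PySem.Dict.empty
  -- sorted(order, key=lambda k: rank.get(k, order[k]))
  PySem.List.sorted order.keys (fun k => rank.getD k (order.getD k 0))

-- ===== PRECONDITION & SPEC =====
def Spec_get_all_fieldnames_py (records : List (List (String × String))) (out : List String) : Prop := out = get_all_fieldnames_py_alt records
instance (records : List (List (String × String))) (out : List String) : Decidable (Spec_get_all_fieldnames_py records out) := by unfold Spec_get_all_fieldnames_py; infer_instance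

-- ===== CLAIM (what is proved, stated in full; the proofs are below) =====
def Claim_equal_get_all_fieldnames_py : Prop := ∀ (records : List (List (String × String))), Dom_get_all_fieldnames_py records → Spec_get_all_fieldnames_py records (get_all_fieldnames_py records)

-- ===== LEMMAS AND PROOFS =====

-- the flat key stream both programs traverse
def pvFlat (records : List (List (String × String))) : List String :=
  records.flatMap (fun r => r.map Prod.fst)

-- the keys of xs not yet in seen-set S, in first-occurrence order (proof-only characterisation)
def pvNewKeys (S : PySem.Set String) : List String → List String
  | [] => []
  | k :: t => if PySem.Set.contains S k then pvNewKeys S t else k :: pvNewKeys (PySem.Set.add S k) t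

lemma pv_mem_contains {S : List String} {x : String} (h : x ∈ S) : PySem.Set.contains S x = true := by
  simp [PySem.Set.contains, h]

lemma pv_not_contains {S : List String} {x : String} (h : x ∉ S) : ¬ PySem.Set.contains S x = true := by
  simp [PySem.Set.contains, h]

lemma pvNewKeys_congr (xs : List String) (S T : List String)
    (h : ∀ x ∈ xs, (x ∈ S ↔ x ∈ T)) : pvNewKeys S xs = pvNewKeys T xs := by
  induction xs generalizing S T with
  | nil => rfl
  | cons k t ih =>
    have ht : ∀ x ∈ t, (x ∈ S ↔ x ∈ T) := fun x hx => h x (List.mem_cons_of_mem _ hx)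
    by_cases hc : k ∈ S
    · have hcT : k ∈ T := (h k (List.mem_cons_self ..)).mp hc
      simp only [pvNewKeys]
      rw [if_pos (pv_mem_contains hc), if_pos (pv_mem_contains hcT)]
      exact ih S T ht
    · have hcT : k ∉ T := fun hk => hc ((h k (List.mem_cons_self ..)).mpr hk)
      simp only [pvNewKeys]
      rw [if_neg (pv_not_contains hc), if_neg (pv_not_contains hcT)]
      refine congrArg (k :: ·) (ih _ _ ?_)
      intro x hx
      rw [PySem.Set.mem_add, PySem.Set.mem_add]
      exact or_congr (ht x hx) Iff.rfl

lemma pv_update_eq (xs : List String) (S : List String) :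
    xs.foldl PySem.Set.add S = S ++ pvNewKeys S xs := by
  induction xs generalizing S with
  | nil => simp [pvNewKeys]
  | cons k t ih =>
    by_cases hc : k ∈ S
    · have hadd : PySem.Set.add S k = S := by simp [PySem.Set.add, hc]
      simp only [List.foldl_cons, hadd, pvNewKeys]
      rw [if_pos (pv_mem_contains hc)]
      exact ih S
    · have hadd : PySem.Set.add S k = S ++ [k] := by simp [PySem.Set.add, hc]
      simp only [List.foldl_cons, pvNewKeys]
      rw [if_neg (pv_not_contains hc), hadd, ih (S ++ [k]), ← hadd]
      simp [hadd]

lemma pv_filter_eq (xs : List String) (P S : List String) :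
    pvNewKeys (P ++ S) xs = (pvNewKeys S xs).filter (fun k => !(PySem.Set.contains P k)) := by
  induction xs generalizing S with
  | nil => rfl
  | cons k t ih =>
    by_cases hS : k ∈ S
    · have hPS : k ∈ P ++ S := List.mem_append.mpr (Or.inr hS)
      simp only [pvNewKeys]
      rw [if_pos (pv_mem_contains hPS), if_pos (pv_mem_contains hS)]
      exact ih S
    · have haddS : PySem.Set.add S k = S ++ [k] := by simp [PySem.Set.add, hS]
      by_cases hP : k ∈ P
      · have hPS : k ∈ P ++ S := List.mem_append.mpr (Or.inl hP)
        simp only [pvNewKeys]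
        rw [if_pos (pv_mem_contains hPS), if_neg (pv_not_contains hS), List.filter_cons,
          if_neg (by simp [PySem.Set.contains, hP])]
        rw [← ih (PySem.Set.add S k)]
        refine pvNewKeys_congr t _ _ ?_
        intro x hx
        rw [haddS]
        simp only [List.mem_append, List.mem_singleton]
        constructor
        · rintro (h | h)
          · exact Or.inl h
          · exact Or.inr (Or.inl h)
        · rintro (h | h | rfl)
          · exact Or.inl h
          · exact Or.inr h
          · exact Or.inl hP
      · have hPS : k ∉ P ++ S := by
          rw [List.mem_append]
          rintro (h | h)
          · exact hP h
          · exact hS h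
        have haddPS : PySem.Set.add (P ++ S) k = P ++ PySem.Set.add S k := by
          simp [PySem.Set.add, hP, hS]
        simp only [pvNewKeys]
        rw [if_neg (pv_not_contains hPS), if_neg (pv_not_contains hS), List.filter_cons,
          if_pos (by simp [PySem.Set.contains, hP])]
        rw [haddPS]
        exact congrArg (k :: ·) (ih (PySem.Set.add S k))

-- the inner body of A's second loop as a named step (definitionally A's loop body)
def pvStep (st : PySem.Set String × List String) (k : String) : PySem.Set String × List String :=
  if PySem.Set.contains st.1 k then st else (PySem.Set.add st.1 k, st.2 ++ [k])

-- A's nested per-record loop is a flat fold of pvStep over pvFlat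
lemma pv_flatten_loop (records : List (List (String × String)))
    (init : PySem.Set String × List String) :
    records.foldl
        (fun st r =>
          r.foldl
            (fun st kv =>
              if PySem.Set.contains st.1 kv.1 then st
              else (PySem.Set.add st.1 kv.1, st.2 ++ [kv.1]))
            st)
        init
      = (pvFlat records).foldl pvStep init := by
  induction records generalizing init with
  | nil => rfl
  | cons r rs ih =>
    rw [List.foldl_cons, ih]
    simp only [pvFlat, List.flatMap_cons, List.foldl_append, List.foldl_map]
    rfl

lemma pv_phase2 (xs : List String) (S : PySem.Set String) (res : List String) :
    xs.foldl pvStep (S, res) = (xs.foldl PySem.Set.add S, res ++ pvNewKeys S xs) := by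
  induction xs generalizing S res with
  | nil => simp [pvNewKeys]
  | cons k t ih =>
    by_cases hc : k ∈ S
    · have hadd : PySem.Set.add S k = S := by simp [PySem.Set.add, hc]
      simp only [List.foldl_cons, pvStep, pvNewKeys, hadd]
      rw [if_pos (pv_mem_contains hc), if_pos (pv_mem_contains hc)]
      exact ih S res
    · simp only [List.foldl_cons, pvStep, pvNewKeys]
      rw [if_neg (pv_not_contains hc), if_neg (pv_not_contains hc), ih]
      simp

lemma pv_any_eq (records : List (List (String × String))) (col : String) :
    (records.any (fun r => r.any (fun kv => kv.1 == col)))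
      = (pvFlat records).contains col := by
  rw [Bool.eq_iff_iff]
  simp [pvFlat, List.any_eq_true, List.mem_flatMap, List.mem_map]

-- A's first loop: joint (seen, result) fold characterised in one shot
lemma pv_phase1 (q : String → Bool) (cols : List String) (S : PySem.Set String) (res : List String) :
    cols.foldl (fun st col => if q col then (PySem.Set.add st.1 col, st.2 ++ [col]) else st) (S, res)
      = ((cols.filter q).foldl PySem.Set.add S, res ++ cols.filter q) := by
  induction cols generalizing S res with
  | nil => simp
  | cons c t ih =>
    by_cases h : q c = true
    · simp only [List.foldl_cons, h, if_pos, List.filter_cons]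
      rw [ih]
      simp
    · simp only [List.foldl_cons, List.filter_cons, h, Bool.false_eq_true, if_false]
      exact ih S res

-- A's result in closed form: present priority columns, then the remaining deduped keys
lemma pv_A_eq (records : List (List (String × String))) :
    get_all_fieldnames_py records
      = pvPriorityList.filter (fun c => (pvFlat records).contains c)
        ++ (pvNewKeys [] (pvFlat records)).filter (fun k => !(PySem.Set.contains pvPriorityList k)) := by
  simp only [get_all_fieldnames_py]
  rw [pv_phase1 (fun col => records.any (fun r => r.any (fun kv => kv.1 == col))),
    pv_flatten_loop, pv_phase2]
  dsimp only
  have hq : pvPriorityList.filter (fun col => records.any (fun r => r.any (fun kv => kv.1 == col)))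
      = pvPriorityList.filter (fun c => (pvFlat records).contains c) := by
    refine List.filter_congr ?_
    intro c _
    exact pv_any_eq records c
  rw [hq, List.nil_append]
  set P := pvPriorityList.filter (fun c => (pvFlat records).contains c) with hP
  refine congrArg (fun t => P ++ t) ?_
  have hseen : P.foldl PySem.Set.add PySem.Set.empty = PySem.Set.ofList P :=
    (PySem.Set.ofList_eq_foldl _).symm
  rw [hseen]
  have hcongr : pvNewKeys (PySem.Set.ofList P) (pvFlat records)
      = pvNewKeys pvPriorityList (pvFlat records) := by
    refine pvNewKeys_congr _ _ _ ?_
    intro x hx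
    rw [PySem.Set.mem_ofList, hP, List.mem_filter]
    constructor
    · rintro ⟨h, _⟩; exact h
    · intro h
      exact ⟨h, by simpa using hx⟩
  rw [hcongr]
  have := pv_filter_eq (pvFlat records) pvPriorityList []
  rw [List.append_nil] at this
  exact this

-- ---- B-side machinery: the index dictionary {l[i] ↦ s + i} ----
def pvIdxDict (s : Int) (l : List String) : PySem.Dict String Int :=
  PySem.Dict.mk ((PySem.List.enumerate l s).map (fun q => (q.2, q.1)))

lemma pv_keys_idxDict (s : Int) (l : List String) : (pvIdxDict s l).keys = l := by
  show ((PySem.List.enumerate l s).map (fun q => (q.2, q.1))).map Prod.fst = l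
  rw [List.map_map]
  exact PySem.List.map_snd_enumerate l s

lemma pv_contains_idxDict (s : Int) (l : List String) (k : String) :
    (pvIdxDict s l).contains k = decide (k ∈ l) := by
  rw [PySem.Dict.contains_eq_decide_mem_keys, pv_keys_idxDict]

lemma pv_size_idxDict (s : Int) (l : List String) : (pvIdxDict s l).size = l.length := by
  show ((PySem.List.enumerate l s).map (fun q => (q.2, q.1))).length = l.length
  rw [List.length_map]
  exact PySem.List.length_enumerate l s

lemma pv_insert_idxDict (s : Int) (l : List String) (k : String) (h : k ∉ l) :
    (pvIdxDict s l).insert k (s + (l.length : Int)) = pvIdxDict s (l ++ [k]) := by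
  apply PySem.Dict.ext
  rw [PySem.Dict.items_insert_of_not_contains _ _ (by rw [pv_contains_idxDict]; simpa using h)]
  show ((PySem.List.enumerate l s).map (fun q => (q.2, q.1))) ++ [(k, s + (l.length : Int))]
      = (PySem.List.enumerate (l ++ [k]) s).map (fun q => (q.2, q.1))
  rw [PySem.List.enumerate_append, List.map_append]
  rfl

lemma pv_getD_idxDict (s : Int) (l : List String) (k : String) (hnd : l.Nodup) (h : k ∈ l)
    (d : Int) : (pvIdxDict s l).getD k d = s + (List.idxOf k l : Int) := by
  have hlt : List.idxOf k l < l.length := List.idxOf_lt_length_of_mem h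
  have hmem : (k, s + (List.idxOf k l : Int)) ∈ (pvIdxDict s l).items := by
    show _ ∈ (PySem.List.enumerate l s).map (fun q => (q.2, q.1))
    refine List.mem_map.mpr ⟨(s + (List.idxOf k l : Int), k), ?_, rfl⟩
    rw [PySem.List.mem_enumerate_iff]
    exact ⟨List.idxOf k l, hlt, by rw [List.getElem_idxOf hlt]⟩
  exact PySem.Dict.getD_of_mem_items _ hmem (by rw [pv_keys_idxDict]; exact hnd) d

lemma pv_getD_idxDict_not (s : Int) (l : List String) (k : String) (h : k ∉ l) (d : Int) :
    (pvIdxDict s l).getD k d = d :=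
  PySem.Dict.getD_of_not_contains _ _ (by rw [pv_contains_idxDict]; simpa using h)

-- the dict comprehension {c: i for i, c in enumerate(l)} is pvIdxDict
lemma pv_enumfold (l : List String) (s : Int) (h : l.Nodup) :
    (PySem.List.enumerate l s).foldl (fun d p => d.insert p.2 p.1) PySem.Dict.empty
      = pvIdxDict s l := by
  apply PySem.Dict.ext
  rw [PySem.Dict.items_foldl_insert_fresh (PySem.List.enumerate l s) (fun p => p.2) (fun p => p.1)
    PySem.Dict.empty (fun a _ => PySem.Dict.contains_empty _)
    (by rw [PySem.List.map_snd_enumerate]; exact h)]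
  rfl

-- the inner body of B's first-appearance loop as a named step (definitionally B's loop body)
def pvStepB (d : PySem.Dict String Int) (k : String) : PySem.Dict String Int :=
  if d.contains k then d else d.insert k ((pvPriorityList.length : Int) + (d.size : Int))

-- B's nested per-record loop is a flat fold of pvStepB over pvFlat
lemma pv_flatten_loop_b (records : List (List (String × String))) (init : PySem.Dict String Int) :
    records.foldl
        (fun order r =>
          r.foldl
            (fun order kv =>
              if order.contains kv.1 then order
              else order.insert kv.1 ((pvPriorityList.length : Int) + (order.size : Int)))
            order)
        init
      = (pvFlat records).foldl pvStepB init := by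
  induction records generalizing init with
  | nil => rfl
  | cons r rs ih =>
    rw [List.foldl_cons, ih]
    simp only [pvFlat, List.flatMap_cons, List.foldl_append, List.foldl_map]
    rfl

-- B's first-appearance loop builds exactly pvIdxDict (l ++ new keys)
lemma pv_order_fold (ks : List String) (l : List String) :
    ks.foldl pvStepB (pvIdxDict (pvPriorityList.length : Int) l)
      = pvIdxDict (pvPriorityList.length : Int) (l ++ pvNewKeys l ks) := by
  induction ks generalizing l with
  | nil => simp [pvNewKeys]
  | cons k t ih =>
    rw [List.foldl_cons]
    simp only [pvStepB]
    rw [pv_contains_idxDict]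
    by_cases hc : k ∈ l
    · rw [if_pos (by simpa using hc)]
      simp only [pvNewKeys]
      rw [if_pos (pv_mem_contains hc)]
      exact ih l
    · rw [if_neg (by simpa using hc), pv_size_idxDict, pv_insert_idxDict _ l k hc, ih (l ++ [k])]
      simp only [pvNewKeys]
      rw [if_neg (pv_not_contains hc)]
      have hadd : PySem.Set.add l k = l ++ [k] := by simp [PySem.Set.add, hc]
      rw [hadd, List.append_assoc]
      rfl

-- idxOf is strictly increasing along a Nodup list
lemma pv_pairwise_idxOf (l : List String) (h : l.Nodup) :
    l.Pairwise (fun a b => List.idxOf a l < List.idxOf b l) := by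
  rw [List.pairwise_iff_getElem]
  intro i j hi hj hij
  rw [h.idxOf_getElem i hi, h.idxOf_getElem j hj]
  exact hij

-- B's result: sorting the deduped keys by rank gives the same closed form
lemma pv_B_eq (records : List (List (String × String))) :
    get_all_fieldnames_py_alt records
      = pvPriorityList.filter (fun c => (pvFlat records).contains c)
        ++ (pvNewKeys [] (pvFlat records)).filter (fun k => !(PySem.Set.contains pvPriorityList k)) := by
  have hprind : pvPriorityList.Nodup := by decide
  simp only [get_all_fieldnames_py_alt]
  rw [pv_enumfold pvPriorityList 0 hprind, pv_flatten_loop_b]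
  have hempty : (PySem.Dict.empty : PySem.Dict String Int)
      = pvIdxDict (pvPriorityList.length : Int) [] := rfl
  rw [hempty, pv_order_fold, List.nil_append, pv_keys_idxDict]
  -- abbreviations
  set F := pvFlat records with hF
  set dd := pvNewKeys [] F with hdd
  have hddofList : dd = PySem.Set.ofList F := by
    rw [hdd, PySem.Set.ofList_eq_foldl, pv_update_eq, List.nil_append]
  have hddnd : dd.Nodup := by rw [hddofList]; exact PySem.Set.nodup_ofList F
  have hddmem : ∀ x, x ∈ dd ↔ x ∈ F := by
    intro x; rw [hddofList]; exact PySem.Set.mem_ofList F x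
  set P := pvPriorityList.filter (fun c => F.contains c) with hP
  set R := dd.filter (fun k => !(PySem.Set.contains pvPriorityList k)) with hR
  have hPmem : ∀ a, a ∈ P ↔ a ∈ pvPriorityList ∧ a ∈ F := by
    intro a; rw [hP, List.mem_filter]; simp
  have hRmem : ∀ a, a ∈ R ↔ a ∈ dd ∧ a ∉ pvPriorityList := by
    intro a; rw [hR, List.mem_filter]; simp [PySem.Set.contains]
  have hPnd : P.Nodup := hprind.filter _
  have hRnd : R.Nodup := hddnd.filter _
  -- the sort key evaluated on both halves
  have hkeyP : ∀ a ∈ P, (pvIdxDict 0 pvPriorityList).getD a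
      ((pvIdxDict (pvPriorityList.length : Int) dd).getD a 0) = (List.idxOf a pvPriorityList : Int) := by
    intro a ha
    rw [pv_getD_idxDict 0 pvPriorityList a hprind ((hPmem a).mp ha).1]
    ring
  have hkeyR : ∀ b ∈ R, (pvIdxDict 0 pvPriorityList).getD b
      ((pvIdxDict (pvPriorityList.length : Int) dd).getD b 0)
      = (pvPriorityList.length : Int) + (List.idxOf b dd : Int) := by
    intro b hb
    rw [pv_getD_idxDict_not 0 pvPriorityList b ((hRmem b).mp hb).2,
      pv_getD_idxDict (pvPriorityList.length : Int) dd b hddnd ((hRmem b).mp hb).1]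
  apply PySem.List.sorted_eq_of_perm_of_pairwise_lt
  · -- (P ++ R).Perm dd
    refine (List.perm_ext_iff_of_nodup ?_ hddnd).mpr ?_
    · refine List.Nodup.append hPnd hRnd ?_
      intro a haP haR
      exact ((hRmem a).mp haR).2 ((hPmem a).mp haP).1
    · intro a
      rw [List.mem_append, hPmem, hRmem, hddmem]
      constructor
      · rintro (⟨_, h⟩ | ⟨h, _⟩) <;> exact h
      · intro h
        by_cases hp : a ∈ pvPriorityList
        · exact Or.inl ⟨hp, h⟩
        · exact Or.inr ⟨h, hp⟩
  · -- strictly increasing key along P ++ R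
    rw [List.pairwise_append]
    refine ⟨?_, ?_, ?_⟩
    · refine List.Pairwise.imp_of_mem ?_
        ((pv_pairwise_idxOf pvPriorityList hprind).filter _)
      intro a b ha hb hlt
      rw [hkeyP a ha, hkeyP b hb]
      exact_mod_cast hlt
    · refine List.Pairwise.imp_of_mem ?_
        ((pv_pairwise_idxOf dd hddnd).filter _)
      intro a b ha hb hlt
      rw [hkeyR a ha, hkeyR b hb]
      omega
    · intro a ha b hb
      rw [hkeyP a ha, hkeyR b hb]
      have h1 : List.idxOf a pvPriorityList < pvPriorityList.length :=
        List.idxOf_lt_length_of_mem ((hPmem a).mp ha).1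
      omega

-- ===== VERDICT (by name: the statement is the Claim_ definition above) =====
theorem get_all_fieldnames_py_spec : Claim_equal_get_all_fieldnames_py := by
  intro records _
  show get_all_fieldnames_py records = get_all_fieldnames_py_alt records
  rw [pv_A_eq, pv_B_eq]
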